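-- pv_equiv track=rewrite | github.com/Tilak-D360/chatbotNLPplug | utils.py | process_shape
-- ===== SOURCE A (Python) =====
-- shape = {
--     'RD': ['R', 'BR', 'BRILLIANT CUT', 'BRILLIANTCUT', 'RB', 'ROUND', 'RD', 'ROUND BRILLIANT', 'BRILLIANT', 'ROUNDBRILLIANT'],
--     'OV': ['OVEL', 'OVAL', 'OV', 'OC', 'OL'],
--     'EM': ['EMERALD', 'EMRD', 'EM', 'EC', 'EMD'],
--     'CU': ['CS', 'CUSHIONMODIFIED', 'CU', 'CMB', 'CM', 'CUSHION', 'CUS', 'CUSHION MODIFIED'],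
--     'PR': ['PRINCESS', 'PC', 'PR', 'PRINCE'],
--     'PS': ['PAER', 'PER', 'PEAR', 'PS'],
--     'RA': ['RAD', 'RADIANT', 'RA'],
--     'MQ': ['MR', 'MAR', 'MARQUISE', 'MQ'],
--     'AS': ['AS', 'ASHCHER', 'ASSCHER'],
--     'HS': ['HS', 'HC', 'HEART', 'HR', 'LOVE', 'HRT'],
--     'TR': ['TRI', 'TR', 'TRIANGLE']
-- }
--
-- def process_shape(s):
--     res = []
--
--     for sh in s:
--         for sha in shape:
--             if sh in shape[sha]:
--                 res.append(sha)
--                 break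
--
--     return res
-- ===== SOURCE B (Python) =====
-- # Same mapping, stored compactly as comma-separated alias strings; expanded once at
-- # import time into a reverse alias->key dict (setdefault keeps first-listed category),
-- # so each query is a single dict lookup instead of a scan over all categories.
-- _SHAPE_DATA = [
--     ("RD", "R,BR,BRILLIANT CUT,BRILLIANTCUT,RB,ROUND,RD,ROUND BRILLIANT,BRILLIANT,ROUNDBRILLIANT"),
--     ("OV", "OVEL,OVAL,OV,OC,OL"),
--     ("EM", "EMERALD,EMRD,EM,EC,EMD"),
--     ("CU", "CS,CUSHIONMODIFIED,CU,CMB,CM,CUSHION,CUS,CUSHION MODIFIED"),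
--     ("PR", "PRINCESS,PC,PR,PRINCE"),
--     ("PS", "PAER,PER,PEAR,PS"),
--     ("RA", "RAD,RADIANT,RA"),
--     ("MQ", "MR,MAR,MARQUISE,MQ"),
--     ("AS", "AS,ASHCHER,ASSCHER"),
--     ("HS", "HS,HC,HEART,HR,LOVE,HRT"),
--     ("TR", "TRI,TR,TRIANGLE"),
-- ]
--
-- _rev = {}
-- for _k, _csv in _SHAPE_DATA:
--     for _a in _csv.split(','):
--         _rev.setdefault(_a, _k)
--
-- def process_shape(s):
--     return [_rev[sh] for sh in s if sh in _rev]
-- ===== Notes on version B (the rewrite author's own statement) =====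
-- stated objective: faster
-- what changed: Stores the table as comma-separated alias strings expanded once at import into a reverse alias-to-key dict (setdefault so the first-listed category wins) and answers each query with one filtered dict lookup instead of A's per-element scan over every category's alias list.
import Mathlib
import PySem

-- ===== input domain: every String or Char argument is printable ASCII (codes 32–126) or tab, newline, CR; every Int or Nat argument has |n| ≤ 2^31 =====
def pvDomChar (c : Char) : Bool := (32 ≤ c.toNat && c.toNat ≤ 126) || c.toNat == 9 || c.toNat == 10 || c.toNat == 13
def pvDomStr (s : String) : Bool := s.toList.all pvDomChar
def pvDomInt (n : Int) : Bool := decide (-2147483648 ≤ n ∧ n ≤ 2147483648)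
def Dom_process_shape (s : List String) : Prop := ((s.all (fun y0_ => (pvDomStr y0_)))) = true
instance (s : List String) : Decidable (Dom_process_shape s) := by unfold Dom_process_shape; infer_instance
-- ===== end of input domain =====

-- B stores the table as CSV alias strings expanded once into a reverse alias→key index
-- (first-listed category wins) and answers each query with one filtered lookup (faster per call).


-- ===== PORT A =====
-- A's module-level `shape` dict (dict → association list in insertion order)
def shapeList : List (String × List String) :=
  [ ("RD", ["R", "BR", "BRILLIANT CUT", "BRILLIANTCUT", "RB", "ROUND", "RD", "ROUND BRILLIANT", "BRILLIANT", "ROUNDBRILLIANT"]),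
    ("OV", ["OVEL", "OVAL", "OV", "OC", "OL"]),
    ("EM", ["EMERALD", "EMRD", "EM", "EC", "EMD"]),
    ("CU", ["CS", "CUSHIONMODIFIED", "CU", "CMB", "CM", "CUSHION", "CUS", "CUSHION MODIFIED"]),
    ("PR", ["PRINCESS", "PC", "PR", "PRINCE"]),
    ("PS", ["PAER", "PER", "PEAR", "PS"]),
    ("RA", ["RAD", "RADIANT", "RA"]),
    ("MQ", ["MR", "MAR", "MARQUISE", "MQ"]),
    ("AS", ["AS", "ASHCHER", "ASSCHER"]),
    ("HS", ["HS", "HC", "HEART", "HR", "LOVE", "HRT"]),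
    ("TR", ["TRI", "TR", "TRIANGLE"]) ]

-- A's inner `for sha in shape: if sh in shape[sha]: append; break` — scan categories, stop at first match
def findKeyA : List (String × List String) → String → Option String
  | [], _ => none
  | (k, vs) :: rest, sh => if vs.contains sh then some k else findKeyA rest sh

def process_shape (s : List String) : List String :=
  s.foldl (fun res sh =>
    match findKeyA shapeList sh with
    | some k => res ++ [k]
    | none => res) []

-- ===== PORT B =====
-- B's `_SHAPE_DATA`: compact comma-separated alias strings
def shapeDataB : List (String × String) :=
  [ ("RD", "R,BR,BRILLIANT CUT,BRILLIANTCUT,RB,ROUND,RD,ROUND BRILLIANT,BRILLIANT,ROUNDBRILLIANT"),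
    ("OV", "OVEL,OVAL,OV,OC,OL"),
    ("EM", "EMERALD,EMRD,EM,EC,EMD"),
    ("CU", "CS,CUSHIONMODIFIED,CU,CMB,CM,CUSHION,CUS,CUSHION MODIFIED"),
    ("PR", "PRINCESS,PC,PR,PRINCE"),
    ("PS", "PAER,PER,PEAR,PS"),
    ("RA", "RAD,RADIANT,RA"),
    ("MQ", "MR,MAR,MARQUISE,MQ"),
    ("AS", "AS,ASHCHER,ASSCHER"),
    ("HS", "HS,HC,HEART,HR,LOVE,HRT"),
    ("TR", "TRI,TR,TRIANGLE") ]

-- `csv.split(',')` — PySem.Chars.splitOn is s.split(sep) for a non-empty sep (exact)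
def splitCsvB (csv : String) : List String :=
  (PySem.Chars.splitOn csv.toList [',']).map String.mk

-- `_rev.setdefault(a, k)`: insert only if the alias is not yet present (first category wins)
def setdefaultB (d : List (String × String)) (a k : String) : List (String × String) :=
  if (d.find? (fun p => p.1 == a)).isSome then d else d ++ [(a, k)]

-- B's module-level reverse index `_rev`
def revIndexB : List (String × String) :=
  shapeDataB.foldl (fun d p => (splitCsvB p.2).foldl (fun d a => setdefaultB d a p.1) d) []

-- `_rev[sh]` for `sh in _rev` (first match in the association list)
def revGetB (d : List (String × String)) (a : String) : Option String :=
  (d.find? (fun p => p.1 == a)).map (fun p => p.2)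

def process_shape_alt (s : List String) : List String :=
  s.filterMap (fun sh => revGetB revIndexB sh)

-- ===== PRECONDITION & SPEC =====
def Spec_process_shape (s : List String) (out : List String) : Prop := out = process_shape_alt s
instance (s : List String) (out : List String) : Decidable (Spec_process_shape s out) := by unfold Spec_process_shape; infer_instance

-- ===== CLAIM (what is proved, stated in full; the proofs are below) =====
def Claim_equal_process_shape : Prop := ∀ (s : List String), Dom_process_shape s → Spec_process_shape s (process_shape s)

-- ===== LEMMAS AND PROOFS =====
theorem revGetB_setdefaultB (d : List (String × String)) (a k x : String) :
    revGetB (setdefaultB d a k) x =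
      (revGetB d x).or (if x = a then some k else none) := by
  unfold setdefaultB revGetB
  by_cases ha : (d.find? (fun p => p.1 == a)).isSome
  · simp only [ha, if_pos]
    by_cases hx : (d.find? (fun p => p.1 == x)).isSome
    · rcases Option.isSome_iff_exists.mp hx with ⟨p, hp⟩
      simp [hp]
    · have hx' : d.find? (fun p => p.1 == x) = none := Option.not_isSome_iff_eq_none.mp hx
      by_cases hxa : x = a
      · subst hxa; exact absurd (hx' ▸ ha) (by simp)
      · simp [hx', hxa]
  · simp only [ha, if_neg, Bool.false_eq_true, not_false_iff]
    rw [List.find?_append]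
    by_cases hx : (d.find? (fun p => p.1 == x)).isSome
    · rcases Option.isSome_iff_exists.mp hx with ⟨p, hp⟩
      simp [hp]
    · have hx' : d.find? (fun p => p.1 == x) = none := Option.not_isSome_iff_eq_none.mp hx
      by_cases hxa : x = a
      · subst hxa; simp [hx', List.find?]
      · have hax : (a == x) = false := by simp [Ne.symm hxa]
        simp only [hx', List.find?, hax, Option.none_or]
        simp [hxa]

theorem revGetB_addAliases (vs : List String) (d : List (String × String)) (k x : String) :
    revGetB (vs.foldl (fun d a => setdefaultB d a k) d) x =
      (revGetB d x).or (if vs.contains x then some k else none) := by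
  induction vs generalizing d with
  | nil => simp
  | cons a rest ih =>
    simp only [List.foldl_cons, ih, revGetB_setdefaultB, Option.or_assoc]
    congr 1
    by_cases hxa : x = a
    · subst hxa; simp
    · simp [hxa]

theorem revGetB_build (L : List (String × String)) (d : List (String × String)) (x : String) :
    revGetB (L.foldl (fun d p => (splitCsvB p.2).foldl (fun d a => setdefaultB d a p.1) d) d) x =
      (revGetB d x).or (findKeyA (L.map (fun p => (p.1, splitCsvB p.2))) x) := by
  induction L generalizing d with
  | nil => simp [findKeyA]
  | cons p rest ih =>
    obtain ⟨k, csv⟩ := p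
    simp only [List.foldl_cons, ih, revGetB_addAliases, Option.or_assoc, List.map_cons, findKeyA]
    congr 1
    split <;> simp

-- the expanded CSV table is exactly A's table
theorem shapeDataB_expands : shapeDataB.map (fun p => (p.1, splitCsvB p.2)) = shapeList := by
  decide

theorem revGetB_revIndexB (x : String) : revGetB revIndexB x = findKeyA shapeList x := by
  unfold revIndexB
  rw [revGetB_build, shapeDataB_expands]
  simp [revGetB, List.find?]

theorem foldl_filterMap (f : String → Option String) (s : List String) (acc : List String) :
    s.foldl (fun res sh => match f sh with | some k => res ++ [k] | none => res) acc =
      acc ++ s.filterMap f := by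
  induction s generalizing acc with
  | nil => simp
  | cons sh rest ih =>
    simp only [List.foldl_cons, List.filterMap_cons]
    cases h : f sh <;> simp [h, ih]

-- ===== VERDICT (by name: the statement is the Claim_ definition above) =====
theorem process_shape_spec : Claim_equal_process_shape := by
  intro s _
  unfold Spec_process_shape process_shape process_shape_alt
  rw [foldl_filterMap (fun sh => findKeyA shapeList sh) s []]
  simp [revGetB_revIndexB]
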